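-- pv_equiv track=rewrite | github.com/metaphorinformation556/MetaphorReasoning | questions/ask_llm_questions_vllm.py | remove_blank_after_question
-- ===== SOURCE A (Python) =====
-- def remove_blank_after_question(prompt: str) -> str:
--     lines = prompt.splitlines()
--     new_lines = []
--     skip_blank = False
--
--     for line in lines:
--         if skip_blank:
--             # skip lines that are empty or only whitespace
--             if line.strip() == "":
--                 continue
--             else:
--                 skip_blank = False  # stop skipping once we reach a real line
--
--         new_lines.append(line)
--
--         # if this line starts with QUESTION:, skip following blank lines
--         if line.lstrip().startswith("QUESTION:"):
--             skip_blank = True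
--
--     return "\n".join(new_lines)
-- ===== SOURCE B (Python) =====
-- def remove_blank_after_question(prompt: str) -> str:
--     # Declarative one-pass-free reformulation: a line is dropped iff it is
--     # blank and the nearest preceding non-blank line starts with "QUESTION:".
--     lines = prompt.splitlines()
--
--     def last_nonblank(prefix):
--         for l in reversed(prefix):
--             if l.strip() != "":
--                 return l
--         return None
--
--     def keep(i):
--         if lines[i].strip() != "":
--             return True
--         p = last_nonblank(lines[:i])
--         return p is None or not p.lstrip().startswith("QUESTION:")
--
--     return "\n".join(lines[i] for i in range(len(lines)) if keep(i))
-- ===== Notes on version B (the rewrite author's own statement) =====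
-- stated objective: alternative
-- what changed: Replaces A's carried skip_blank flag state machine with a stateless per-line predicate: keep a line unless it is blank and the nearest preceding non-blank line is a question-marker line.
import Mathlib
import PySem

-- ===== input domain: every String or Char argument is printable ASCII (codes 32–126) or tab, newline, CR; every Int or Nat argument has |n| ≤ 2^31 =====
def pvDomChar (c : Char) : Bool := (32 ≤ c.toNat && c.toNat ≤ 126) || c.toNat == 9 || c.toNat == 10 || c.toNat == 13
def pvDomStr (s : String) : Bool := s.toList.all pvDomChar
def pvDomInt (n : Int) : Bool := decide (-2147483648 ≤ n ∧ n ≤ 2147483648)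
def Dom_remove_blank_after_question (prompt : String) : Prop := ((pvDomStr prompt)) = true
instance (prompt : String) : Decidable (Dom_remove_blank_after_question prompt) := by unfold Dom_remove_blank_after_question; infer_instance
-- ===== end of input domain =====

-- B removes A's carried skip_blank flag: a line is kept unless it is blank and the
-- nearest preceding non-blank line starts with "QUESTION:" (objective: alternative decomposition).

-- ===== PORT A =====
def remove_blank_after_question (prompt : String) : String :=
  let lines := PySem.Str.splitlines prompt
  let st := lines.foldl (fun (st : List String × Bool) line =>
      if st.2 && (PySem.Str.strip line == "") then st
      else (st.1 ++ [line], PySem.Str.startswith (PySem.Str.lstrip line) "QUESTION:"))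
    ([], false)
  PySem.Str.join "\n" st.1

-- ===== PORT B =====
-- Source B's last_nonblank: first non-blank line of the reversed prefix
def pvLastNonblank (pre : List String) : Option String :=
  pre.reverse.find? (fun l => !(PySem.Str.strip l == ""))

-- Source B's keep(i)
def pvKeep (lines : List String) (i : Nat) : Bool :=
  if !(PySem.Str.strip (lines.getD i "") == "") then true
  else
    match pvLastNonblank (lines.take i) with
    | none => true
    | some p => !(PySem.Str.startswith (PySem.Str.lstrip p) "QUESTION:")

def remove_blank_after_question_alt (prompt : String) : String :=
  let lines := PySem.Str.splitlines prompt
  PySem.Str.join "\n"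
    (((List.range lines.length).filter (pvKeep lines)).map (fun i => lines.getD i ""))

-- ===== PRECONDITION & SPEC =====
def Spec_remove_blank_after_question (prompt : String) (out : String) : Prop := out = remove_blank_after_question_alt prompt
instance (prompt : String) (out : String) : Decidable (Spec_remove_blank_after_question prompt out) := by unfold Spec_remove_blank_after_question; infer_instance

-- ===== CLAIM (what is proved, stated in full; the proofs are below) =====
def Claim_equal_remove_blank_after_question : Prop := ∀ (prompt : String), Dom_remove_blank_after_question prompt → Spec_remove_blank_after_question prompt (remove_blank_after_question prompt)

-- ===== LEMMAS AND PROOFS =====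
def pvBlank (l : String) : Bool := PySem.Str.strip l == ""
def pvQ (l : String) : Bool := PySem.Str.startswith (PySem.Str.lstrip l) "QUESTION:"

-- the list of kept lines, as A computes it from state sb
def keptOf : Bool → List String → List String
  | _, [] => []
  | sb, l :: ls => if sb && pvBlank l then keptOf sb ls else l :: keptOf (pvQ l) ls

def endSb : Bool → List String → Bool
  | sb, [] => sb
  | sb, l :: ls => if sb && pvBlank l then endSb sb ls else endSb (pvQ l) ls

lemma keptOf_cons (sb : Bool) (l : String) (ls : List String) :
    keptOf sb (l :: ls) = if sb && pvBlank l then keptOf sb ls else l :: keptOf (pvQ l) ls := rfl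

lemma endSb_cons (sb : Bool) (l : String) (ls : List String) :
    endSb sb (l :: ls) = if sb && pvBlank l then endSb sb ls else endSb (pvQ l) ls := rfl

lemma foldA (ls : List String) : ∀ acc sb,
    ls.foldl (fun (st : List String × Bool) line =>
        if st.2 && (PySem.Str.strip line == "") then st
        else (st.1 ++ [line], PySem.Str.startswith (PySem.Str.lstrip line) "QUESTION:"))
      (acc, sb)
      = (acc ++ keptOf sb ls, endSb sb ls) := by
  induction ls with
  | nil => intro acc sb; simp [keptOf, endSb]
  | cons l ls ih =>
    intro acc sb
    simp only [List.foldl_cons]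
    by_cases h : (sb && pvBlank l) = true
    · have h' : (sb && (PySem.Str.strip l == "")) = true := h
      rw [if_pos h', ih, keptOf_cons, endSb_cons, if_pos h, if_pos h]
    · have h' : ¬ (sb && (PySem.Str.strip l == "")) = true := h
      rw [if_neg h', ih, keptOf_cons, endSb_cons, if_neg h, if_neg h]
      simp [pvQ]

lemma blank_pvQ (l : String) (h : pvBlank l = true) : pvQ l = false := by
  unfold pvBlank at h
  have hs : (PySem.Str.strip l).toList = [] := by
    rw [beq_iff_eq.mp h]; rfl
  rw [PySem.Str.toList_strip] at hs
  unfold PySem.Chars.strip PySem.Chars.rstrip at hs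
  have hs2 : List.dropWhile PySem.Chars.isspace (PySem.Chars.lstrip l.toList).reverse = [] := by
    simpa using congrArg List.reverse hs
  have hall := List.dropWhile_eq_nil_iff.mp hs2
  have h2 : PySem.Chars.lstrip l.toList = [] := by
    cases hl : PySem.Chars.lstrip l.toList with
    | nil => rfl
    | cons c cs =>
      exfalso
      have hne : List.dropWhile PySem.Chars.isspace l.toList ≠ [] := by
        unfold PySem.Chars.lstrip at hl; simp [hl]
      have hc : PySem.Chars.isspace ((List.dropWhile PySem.Chars.isspace l.toList).head hne) = false :=
        List.head_dropWhile_not PySem.Chars.isspace hne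
      have hchead : (List.dropWhile PySem.Chars.isspace l.toList).head hne = c := by
        unfold PySem.Chars.lstrip at hl; simp [hl]
      have hcmem : c ∈ (PySem.Chars.lstrip l.toList).reverse := by
        rw [hl]; simp
      rw [hchead] at hc
      rw [hall c hcmem] at hc
      exact Bool.true_eq_false.mp hc
  unfold pvQ
  rw [PySem.Str.startswith_eq, PySem.Str.toList_lstrip, h2]
  rfl

def sbOf (p : List String) : Bool :=
  match pvLastNonblank p with
  | none => false
  | some x => pvQ x

lemma lastNB_append (p : List String) (l : String) :
    pvLastNonblank (p ++ [l]) = if pvBlank l then pvLastNonblank p else some l := by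
  unfold pvLastNonblank pvBlank
  by_cases h : (PySem.Str.strip l == "") = true
  · simp [h]
  · simp [h]

lemma sbOf_append (p : List String) (l : String) :
    sbOf (p ++ [l]) = if pvBlank l then sbOf p else pvQ l := by
  unfold sbOf
  rw [lastNB_append]
  by_cases h : pvBlank l = true
  · simp [h]
  · simp [h]

lemma keep_at (p : List String) (l : String) (q : List String) :
    pvKeep (p ++ l :: q) p.length = !(sbOf p && pvBlank l) := by
  have hget : (p ++ l :: q).getD p.length "" = l := by
    simp [List.getD]
  have htake : (p ++ l :: q).take p.length = p := List.take_left
  unfold pvKeep sbOf pvBlank pvQ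
  rw [hget, htake]
  by_cases hb : (PySem.Str.strip l == "") = true
  · cases hnb : pvLastNonblank p with
    | none => simp [hb]
    | some x => simp [hb]
  · cases hnb : pvLastNonblank p with
    | none => simp [hb]
    | some x => simp [hb]

lemma B_main : ∀ (q p : List String),
    ((List.range' p.length q.length).filter (pvKeep (p ++ q))).map
        (fun i => (p ++ q).getD i "")
      = keptOf (sbOf p) q := by
  intro q
  induction q with
  | nil => intro p; simp [keptOf]
  | cons l q ih =>
    intro p
    have hrw : p ++ l :: q = (p ++ [l]) ++ q := by simp
    have hlen : p.length + 1 = (p ++ [l]).length := by simp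
    have hget : (p ++ l :: q).getD p.length "" = l := by
      simp [List.getD]
    simp only [List.length_cons, List.range'_succ, List.filter_cons, keep_at]
    by_cases hsb : (sbOf p && pvBlank l) = true
    · rw [hsb]
      simp only [Bool.not_true, Bool.false_eq_true, if_false]
      rw [hrw, hlen, ih (p ++ [l])]
      obtain ⟨hq, hb⟩ : sbOf p = true ∧ pvBlank l = true := by simpa using hsb
      rw [sbOf_append, if_pos hb, keptOf, hq, hb]
      simp
    · rw [Bool.not_eq_true] at hsb
      rw [hsb]
      simp only [Bool.not_false, if_true, List.map_cons, hget]
      rw [hrw, hlen, ih (p ++ [l]), keptOf]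
      have hsb' : (sbOf p && pvBlank l) = false := hsb
      rw [hsb']
      simp only [Bool.false_eq_true, if_false]
      congr 1
      rw [sbOf_append]
      by_cases hb : pvBlank l = true
      · have hq0 : sbOf p = false := by
          cases hx : sbOf p
          · rfl
          · rw [hx, hb] at hsb'; simp at hsb'
        rw [if_pos hb, hq0, blank_pvQ l hb]
      · rw [if_neg hb]

-- ===== VERDICT (by name: the statement is the Claim_ definition above) =====
theorem remove_blank_after_question_spec : Claim_equal_remove_blank_after_question := by
  intro prompt _
  unfold Spec_remove_blank_after_question remove_blank_after_question remove_blank_after_question_alt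
  simp only []
  rw [foldA]
  have hB := B_main (PySem.Str.splitlines prompt) []
  simp only [List.nil_append, List.length_nil] at hB
  rw [← List.range_eq_range'] at hB
  rw [hB]
  rfl
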